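-- pv_equiv track=rewrite | github.com/anatolyPK/karta_snov | src/services/nomenclature_finder.py | calculate_100_000
-- ===== SOURCE A (Python) =====
-- def calculate_100_000(zone, map_number, sub_number, *args, **kwargs):
--     sub_number = int(sub_number)
--
--     directions = {
--         'lt': (0, 0, sub_number - 13),
--         't': (0, 0, sub_number - 12),
--         'rt': (0, 0, sub_number - 11),
--         'l': (0, 0, sub_number - 1),
--         'r': (0, 0, sub_number + 1),
--         'lb': (0, 0, sub_number + 11),
--         'b': (0, 0, sub_number + 12),
--         'rb': (0, 0, sub_number + 13)
--     }
--
--     if 1 <= sub_number <= 12: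
--         directions.update({
--             'lt': (1, 0, 131 + sub_number),
--             't': (1, 0, 132 + sub_number),
--             'rt': (1, 0, 133 + sub_number),
--             'lb': (0, 0, sub_number + 11),
--             'b': (0, 0, sub_number + 12),
--             'rb': (0, 0, sub_number + 13)
--         })
--         if sub_number == 1:
--             directions.update({'lt': (1, -1, 144), 'l': (0, -1, 12), 'lb': (0, -1, 24)})
--         elif sub_number == 12:
--             directions.update({'rt': (1, 1, 133), 'r': (0, 1, 1), 'rb': (0, 1, 13)})
--     elif 133 <= sub_number <= 144:
--         directions.update({
--             'lt': (1, -1, sub_number - 13),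
--             't': (0, 0, sub_number - 12),
--             'rt': (0, 0, sub_number - 11),
--             'lb': (-1, 0, sub_number - 133),
--             'b': (-1, 0, sub_number - 132),
--             'rb': (-1, 0, sub_number - 131)
--         })
--         if sub_number == 133:
--             directions.update({'lt': (0, -1, 132), 'l': (0, -1, 144), 'lb': (-1, -1, 12)})
--         elif sub_number == 144:
--             directions.update({'rt': (0, 1, 121), 'r': (0, 1, 133), 'rb': (-1, 1, 1)})
--     elif sub_number % 12 == 1:
--         directions.update(
--             {'lt': (0, -1, sub_number - 1), 'l': (0, -1, sub_number + 11), 'lb': (0, -1, sub_number + 23)})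
--     elif sub_number % 12 == 0:
--         directions.update({'rt': (0, 1, sub_number - 23), 'r': (0, 1, sub_number - 11), 'rb': (0, 1, sub_number + 1)})
--
--     nomenclatures = {
--         direction: f"{chr(ord(zone) + dz)}-{map_number + dm}-{new_sub}"
--         for direction, (dz, dm, new_sub) in directions.items()
--     }
--     nomenclatures['m'] = f'{zone}-{map_number}-{sub_number}'
--     return nomenclatures
-- ===== SOURCE B (Python) =====
-- def calculate_100_000(zone, map_number, sub_number, *args, **kwargs):
--     sub = int(sub_number)
--     r, c = (sub - 1) // 12, (sub - 1) % 12
--     out = {}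
--     for name, dr, dc in (('lt', -1, -1), ('t', -1, 0), ('rt', -1, 1),
--                          ('l', 0, -1), ('r', 0, 1),
--                          ('lb', 1, -1), ('b', 1, 0), ('rb', 1, 1)):
--         dz = dm = 0
--         nr, nc = r + dr, c + dc
--         if dr == -1 and r == 0:
--             dz, nr = 1, 11
--         if dr == 1 and r == 11:
--             dz, nr = -1, 0
--         if dc == -1 and c == 0:
--             dm, nc = -1, 11
--         if dc == 1 and c == 11:
--             dm, nc = 1, 0
--         out[name] = f"{chr(ord(zone) + dz)}-{map_number + dm}-{nr * 12 + nc + 1}"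
--     out['m'] = f"{zone}-{map_number}-{sub}"
--     return out
-- ===== Notes on version B (the rewrite author's own statement) =====
-- stated objective: simpler
-- what changed: B replaces A's table of five special-cased dict-update branches (top row, bottom row, corners, left/right columns, with hand-written sub numbers for each of 8 directions) by a single uniform loop over the 8 (dr,dc) offsets on grid coordinates r=(sub-1)//12, c=(sub-1)%12 with boundary wrapping, computing new_sub = nr*12+nc+1.
-- intended difference: For 134 <= sub_number <= 144 (bottom-row cells except the 133 corner) A's 'lt' entry wrongly shifts zone by +1 and map_number by -1 (a leftover from the top-row branch), while B keeps the same zone and map_number, which is the intended up-left neighbour of a non-edge bottom-row cell. — e.g. on calculate_100_000("A", 1, 134): A returns [("lt", "B-0-121"), ("t", "A-1-122"), ("rt", "A-1-123"), ("l", "A-1-133"), ("r", "A-1-135"), ("lb", "@-1-1"), ("b", "@-…, B returns [("lt", "A-1-121"), ("t", "A-1-122"), ("rt", "A-1-123"), ("l", "A-1-133"), ("r", "A-1-135"), ("lb", "@-1-1"), ("b", "@-…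
import Mathlib
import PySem

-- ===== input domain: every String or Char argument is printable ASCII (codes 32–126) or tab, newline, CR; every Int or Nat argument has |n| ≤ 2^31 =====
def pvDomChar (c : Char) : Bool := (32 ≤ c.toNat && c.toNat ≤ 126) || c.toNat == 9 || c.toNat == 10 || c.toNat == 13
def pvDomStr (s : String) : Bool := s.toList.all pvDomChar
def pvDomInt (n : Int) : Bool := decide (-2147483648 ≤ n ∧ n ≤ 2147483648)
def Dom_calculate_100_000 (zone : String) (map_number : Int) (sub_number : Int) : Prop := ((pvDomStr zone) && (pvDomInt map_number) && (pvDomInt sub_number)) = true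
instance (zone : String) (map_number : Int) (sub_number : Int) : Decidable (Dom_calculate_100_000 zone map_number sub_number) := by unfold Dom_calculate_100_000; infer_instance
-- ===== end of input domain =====

-- B replaces A's five special-cased dict-update branches by one uniform loop over the 8
-- (dr,dc) offsets on grid coordinates with boundary wrapping (objective: simpler).
-- Return-value equivalence only; neither program mutates its arguments.

-- ord(zone): Python raises TypeError unless zone has exactly one character; Pre_ restricts
-- to that case, so the headD default is never reached on admitted inputs.
def pvOrd (zone : String) : Int := ((zone.toList.headD ' ').toNat : Int)

-- chr(n): exact for 0 ≤ n < 0xd800, which covers every value reached under Dom ∧ Pre_.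
def pvChr (n : Int) : Char := Char.ofNat n.toNat

-- f"{chr(ord(zone)+dz)}-{map_number+dm}-{new_sub}"  (identical f-string in A and in B)
def pvFmt (zone : String) (map_number dz dm new_sub : Int) : String :=
  String.ofList (pvChr (pvOrd zone + dz) :: '-' ::
    (PySem.Int.toChars (map_number + dm) ++ '-' :: PySem.Int.toChars new_sub))

-- f"{zone}-{map_number}-{sub_number}"  (identical f-string in A and in B)
def pvFmtM (zone : String) (map_number sub : Int) : String :=
  String.ofList (zone.toList ++ '-' :: (PySem.Int.toChars map_number ++ '-' :: PySem.Int.toChars sub))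

-- ===== PORT A =====
def calculate_100_000 (zone : String) (map_number : Int) (sub_number : Int) : List (String × String) :=
  let sub := sub_number          -- int(sub_number) is the identity on an int argument
  let d : PySem.Dict String (Int × Int × Int) :=
    PySem.Dict.ofList [("lt", (0, 0, sub - 13)), ("t", (0, 0, sub - 12)), ("rt", (0, 0, sub - 11)),
      ("l", (0, 0, sub - 1)), ("r", (0, 0, sub + 1)),
      ("lb", (0, 0, sub + 11)), ("b", (0, 0, sub + 12)), ("rb", (0, 0, sub + 13))]
  let d :=
    if 1 ≤ sub ∧ sub ≤ 12 then
      let d := d.update [("lt", (1, 0, 131 + sub)), ("t", (1, 0, 132 + sub)), ("rt", (1, 0, 133 + sub)),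
        ("lb", (0, 0, sub + 11)), ("b", (0, 0, sub + 12)), ("rb", (0, 0, sub + 13))]
      if sub = 1 then d.update [("lt", (1, -1, 144)), ("l", (0, -1, 12)), ("lb", (0, -1, 24))]
      else if sub = 12 then d.update [("rt", (1, 1, 133)), ("r", (0, 1, 1)), ("rb", (0, 1, 13))]
      else d
    else if 133 ≤ sub ∧ sub ≤ 144 then
      let d := d.update [("lt", (1, -1, sub - 13)), ("t", (0, 0, sub - 12)), ("rt", (0, 0, sub - 11)),
        ("lb", (-1, 0, sub - 133)), ("b", (-1, 0, sub - 132)), ("rb", (-1, 0, sub - 131))]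
      if sub = 133 then d.update [("lt", (0, -1, 132)), ("l", (0, -1, 144)), ("lb", (-1, -1, 12))]
      else if sub = 144 then d.update [("rt", (0, 1, 121)), ("r", (0, 1, 133)), ("rb", (-1, 1, 1))]
      else d
    else if PySem.Int.mod sub 12 = 1 then
      d.update [("lt", (0, -1, sub - 1)), ("l", (0, -1, sub + 11)), ("lb", (0, -1, sub + 23))]
    else if PySem.Int.mod sub 12 = 0 then
      d.update [("rt", (0, 1, sub - 23)), ("r", (0, 1, sub - 11)), ("rb", (0, 1, sub + 1))]
    else d
  let nomenclatures : PySem.Dict String String :=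
    PySem.Dict.ofList (d.items.map (fun p => (p.1, pvFmt zone map_number p.2.1 p.2.2.1 p.2.2.2)))
  let nomenclatures := nomenclatures.insert "m" (pvFmtM zone map_number sub)
  nomenclatures.items

-- ===== PORT B =====
-- B's `out` dict only ever receives fresh distinct keys ('lt' … 'rb', then 'm'), so its
-- insertion-ordered items are exactly this appended list.
def calculate_100_000_alt (zone : String) (map_number : Int) (sub_number : Int) : List (String × String) :=
  let sub := sub_number
  let r := PySem.Int.floordiv (sub - 1) 12
  let c := PySem.Int.mod (sub - 1) 12
  let out : List (String × String) :=
    ([("lt", (-1 : Int), (-1 : Int)), ("t", -1, 0), ("rt", -1, 1), ("l", 0, -1), ("r", 0, 1),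
      ("lb", 1, -1), ("b", 1, 0), ("rb", 1, 1)] : List (String × Int × Int)).foldl
      (fun out t =>
        let name := t.1
        let dr := t.2.1
        let dc := t.2.2
        let dz : Int := 0
        let dm : Int := 0
        let nr := r + dr
        let nc := c + dc
        let p1 := if dr = -1 ∧ r = 0 then ((1 : Int), (11 : Int)) else (dz, nr)
        let p2 := if dr = 1 ∧ r = 11 then ((-1 : Int), (0 : Int)) else p1
        let q1 := if dc = -1 ∧ c = 0 then ((-1 : Int), (11 : Int)) else (dm, nc)
        let q2 := if dc = 1 ∧ c = 11 then ((1 : Int), (0 : Int)) else q1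
        out ++ [(name, pvFmt zone map_number p2.1 q2.1 (p2.2 * 12 + q2.2 + 1))]) []
  out ++ [("m", pvFmtM zone map_number sub)]

-- ===== PRECONDITION & SPEC =====
-- Pre_ excludes zones that are not a single character: there ord(zone) raises TypeError
-- in A (and in B alike), so A returns no value.
def Pre_calculate_100_000 (zone : String) (map_number : Int) (sub_number : Int) : Prop :=
  zone.toList.length = 1
instance (zone : String) (map_number : Int) (sub_number : Int) : Decidable (Pre_calculate_100_000 zone map_number sub_number) := by unfold Pre_calculate_100_000; infer_instance

def pvWitness_calculate_100_000 : String × Int × Int := ("K", 37, 5)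

-- For 134 ≤ sub_number ≤ 144 (bottom-row cells except the 133 corner) A's 'lt' entry wrongly
-- shifts zone by +1 and map_number by -1 (a leftover from the top-row branch), while B keeps
-- the same zone and map_number, the intended up-left neighbour of a non-edge bottom-row cell.
def D_calculate_100_000 (zone : String) (map_number : Int) (sub_number : Int) : Prop :=
  134 ≤ sub_number ∧ sub_number ≤ 144
instance (zone : String) (map_number : Int) (sub_number : Int) : Decidable (D_calculate_100_000 zone map_number sub_number) := by unfold D_calculate_100_000; infer_instance

def Spec_calculate_100_000 (zone : String) (map_number : Int) (sub_number : Int) (out : List (String × String)) : Prop := ¬ D_calculate_100_000 zone map_number sub_number → out = calculate_100_000_alt zone map_number sub_number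
instance (zone : String) (map_number : Int) (sub_number : Int) (out : List (String × String)) : Decidable (Spec_calculate_100_000 zone map_number sub_number out) := by unfold Spec_calculate_100_000; infer_instance

def pvDiffWitness_calculate_100_000 : String × Int × Int := ("A", 1, 134)
def pvDiffWitnessOut_calculate_100_000 : (List (String × String)) × (List (String × String)) :=
  ([("lt", "B-0-121"), ("t", "A-1-122"), ("rt", "A-1-123"), ("l", "A-1-133"), ("r", "A-1-135"),
    ("lb", "@-1-1"), ("b", "@-1-2"), ("rb", "@-1-3"), ("m", "A-1-134")],
   [("lt", "A-1-121"), ("t", "A-1-122"), ("rt", "A-1-123"), ("l", "A-1-133"), ("r", "A-1-135"),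
    ("lb", "@-1-1"), ("b", "@-1-2"), ("rb", "@-1-3"), ("m", "A-1-134")])

-- ===== CLAIM (what is proved, stated in full; the proofs are below) =====
def Claim_unchanged_calculate_100_000 : Prop := ∀ (zone : String) (map_number : Int) (sub_number : Int), Dom_calculate_100_000 zone map_number sub_number → Pre_calculate_100_000 zone map_number sub_number → Spec_calculate_100_000 zone map_number sub_number (calculate_100_000 zone map_number sub_number)
def Claim_changed_calculate_100_000 : Prop := Dom_calculate_100_000 (pvDiffWitness_calculate_100_000.1) (pvDiffWitness_calculate_100_000.2.1) (pvDiffWitness_calculate_100_000.2.2) ∧ Pre_calculate_100_000 (pvDiffWitness_calculate_100_000.1) (pvDiffWitness_calculate_100_000.2.1) (pvDiffWitness_calculate_100_000.2.2) ∧ D_calculate_100_000 (pvDiffWitness_calculate_100_000.1) (pvDiffWitness_calculate_100_000.2.1) (pvDiffWitness_calculate_100_000.2.2) ∧ calculate_100_000 (pvDiffWitness_calculate_100_000.1) (pvDiffWitness_calculate_100_000.2.1) (pvDiffWitness_calculate_100_000.2.2) = pvDiffWitnessOut_calculate_100_000.1 ∧ calculate_100_000_alt (pvDiffWitness_calculate_100_000.1)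 (pvDiffWitness_calculate_100_000.2.1) (pvDiffWitness_calculate_100_000.2.2) = pvDiffWitnessOut_calculate_100_000.2 ∧ pvDiffWitnessOut_calculate_100_000.1 ≠ pvDiffWitnessOut_calculate_100_000.2
def Claim_exact_calculate_100_000 : Prop := ∀ (zone : String) (map_number : Int) (sub_number : Int), Dom_calculate_100_000 zone map_number sub_number → Pre_calculate_100_000 zone map_number sub_number → D_calculate_100_000 zone map_number sub_number → calculate_100_000 zone map_number sub_number ≠ calculate_100_000_alt zone map_number sub_number

-- ===== LEMMAS AND PROOFS =====
-- congruence for the shared f-string helper (used to close each branch's list equality)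
theorem pvFmt_congr (z : String) (mp : Int) {dz dm ns dz' dm' ns' : Int}
    (h1 : dz = dz') (h2 : dm = dm') (h3 : ns = ns') :
    pvFmt z mp dz dm ns = pvFmt z mp dz' dm' ns' := by subst h1 h2 h3; rfl

-- chr/ord round trip on the ASCII range reached under Dom
theorem pvChrToNat (n : Nat) (h : n ≤ 127) : (Char.ofNat n).toNat = n := by
  rw [Char.ofNat, dif_pos (Or.inl (by omega))]
  rw [Char.ofNatAux, Char.toNat]
  simp

-- main equivalence, parametrised by q = (sub-1)//12 and m = (sub-1)%12;
-- ¬(q = 11 ∧ 1 ≤ m) is ¬D_ (the bottom row away from the 133 corner)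
set_option maxHeartbeats 1000000 in
theorem pv_main (zone : String) (mp sub q m : Int)
    (hq : PySem.Int.floordiv (sub - 1) 12 = q) (hm : PySem.Int.mod (sub - 1) 12 = m)
    (hqm : q * 12 + m = sub - 1) (hm0 : 0 ≤ m) (hm12 : m < 12)
    (hnd : ¬ (q = 11 ∧ 1 ≤ m)) :
    calculate_100_000 zone mp sub = calculate_100_000_alt zone mp sub := by
  have hmod : PySem.Int.mod sub 12 = if m = 11 then 0 else m + 1 := by
    rw [PySem.Int.mod_eq_emod_of_pos (by norm_num)]
    rw [PySem.Int.mod_eq_emod_of_pos (by norm_num)] at hm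
    split_ifs with h <;> omega
  simp only [calculate_100_000, calculate_100_000_alt, List.foldl]
  rw [hq, hm, hmod]
  by_cases hq0 : q = 0
  · by_cases hA : m = 0
    · -- sub = 1: upper-left corner
      simp [show sub = 1 from by omega, hq0, hA,
        PySem.Dict.ofList, PySem.Dict.update, PySem.Dict.insert, PySem.Dict.contains,
        PySem.Dict.items, PySem.Dict.empty]
      all_goals and_intros <;> first | rfl | (apply pvFmt_congr <;> omega)
    · by_cases hB : m = 11
      · -- sub = 12: upper-right corner
        simp [show sub = 12 from by omega, hq0, hB, show ¬ m = 0 from by omega,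
          PySem.Dict.ofList, PySem.Dict.update, PySem.Dict.insert, PySem.Dict.contains,
          PySem.Dict.items, PySem.Dict.empty]
        all_goals and_intros <;> first | rfl | (apply pvFmt_congr <;> omega)
      · -- top row, interior column
        simp [show 1 ≤ sub ∧ sub ≤ 12 from by omega, show ¬ sub = 1 from by omega,
          show ¬ sub = 12 from by omega, show ¬ m = 0 from by omega,
          show ¬ m = 11 from by omega, hq0,
          PySem.Dict.ofList, PySem.Dict.update, PySem.Dict.insert, PySem.Dict.contains,
          PySem.Dict.items, PySem.Dict.empty]
        all_goals and_intros <;> first | rfl | (apply pvFmt_congr <;> omega)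
  · by_cases hq11 : q = 11
    · -- bottom row: ¬D_ forces the 133 corner
      have hA : m = 0 := by
        rcases Decidable.em (1 ≤ m) with h | h
        · exact absurd ⟨hq11, h⟩ hnd
        · omega
      simp [show sub = 133 from by omega, hq11, hA, show ¬ (1 ≤ sub ∧ sub ≤ 12) from by omega,
        PySem.Dict.ofList, PySem.Dict.update, PySem.Dict.insert, PySem.Dict.contains,
        PySem.Dict.items, PySem.Dict.empty]
      all_goals and_intros <;> first | rfl | (apply pvFmt_congr <;> omega)
    · by_cases hA : m = 0
      · -- left column, interior row
        simp [hA, hq0, hq11, show ¬ (1 ≤ sub ∧ sub ≤ 12) from by omega,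
          show ¬ (133 ≤ sub ∧ sub ≤ 144) from by omega,
          PySem.Dict.ofList, PySem.Dict.update, PySem.Dict.insert, PySem.Dict.contains,
          PySem.Dict.items, PySem.Dict.empty]
        all_goals and_intros <;> first | rfl | (apply pvFmt_congr <;> omega)
      · by_cases hB : m = 11
        · -- right column, interior row
          simp [hB, hq0, hq11, show ¬ (1 ≤ sub ∧ sub ≤ 12) from by omega,
            show ¬ (133 ≤ sub ∧ sub ≤ 144) from by omega, show ¬ m = 0 from by omega,
            PySem.Dict.ofList, PySem.Dict.update, PySem.Dict.insert, PySem.Dict.contains,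
            PySem.Dict.items, PySem.Dict.empty]
          all_goals and_intros <;> first | rfl | (apply pvFmt_congr <;> omega)
        · -- interior cell
          simp [hq0, hq11, hA, hB, show ¬ (1 ≤ sub ∧ sub ≤ 12) from by omega,
            show ¬ (133 ≤ sub ∧ sub ≤ 144) from by omega,
            show ¬ (m + 1 = 1) from by omega, show ¬ (m + 1 = 0) from by omega,
            PySem.Dict.ofList, PySem.Dict.update, PySem.Dict.insert, PySem.Dict.contains,
            PySem.Dict.items, PySem.Dict.empty]
          all_goals and_intros <;> first | rfl | (apply pvFmt_congr <;> omega)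

-- ===== VERDICT (by name: the statement is the Claim_ definition above) =====
theorem calculate_100_000_spec : Claim_unchanged_calculate_100_000 := by
  intro zone mp sub _ _
  unfold Spec_calculate_100_000
  intro hnd
  simp only [D_calculate_100_000] at hnd
  have h1 := PySem.Int.floordiv_mul_add_mod (sub - 1) 12
  have h2 : 0 ≤ PySem.Int.mod (sub - 1) 12 := PySem.Int.mod_nonneg _ (by norm_num)
  have h3 : PySem.Int.mod (sub - 1) 12 < 12 := PySem.Int.mod_lt _ (by norm_num)
  exact pv_main zone mp sub _ _ rfl rfl (by omega) h2 h3 (by intro hcon; exact hnd ⟨by omega, by omega⟩)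

theorem calculate_100_000_changed : Claim_changed_calculate_100_000 := by
  unfold Claim_changed_calculate_100_000; decide

set_option maxHeartbeats 2000000 in
theorem calculate_100_000_tight : Claim_exact_calculate_100_000 := by
  intro zone mp sub hdom hpre hd heq
  simp only [Pre_calculate_100_000] at hpre
  simp only [D_calculate_100_000] at hd
  obtain ⟨c, hc⟩ : ∃ c, zone.toList = [c] := by
    cases h : zone.toList with
    | nil => rw [h] at hpre; simp at hpre
    | cons a t => cases t with
      | nil => exact ⟨a, rfl⟩
      | cons b u => rw [h] at hpre; simp at hpre
  have hcb : c.toNat ≤ 126 := by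
    simp only [Dom_calculate_100_000, Bool.and_eq_true, pvDomStr, hc, List.all_cons,
      List.all_nil, Bool.and_true, pvDomChar] at hdom
    have := hdom.1.1
    simp only [Bool.or_eq_true, Bool.and_eq_true, decide_eq_true_eq, beq_iff_eq] at this
    omega
  have h1 := PySem.Int.floordiv_mul_add_mod (sub - 1) 12
  have h2 : 0 ≤ PySem.Int.mod (sub - 1) 12 := PySem.Int.mod_nonneg _ (by norm_num)
  have h3 : PySem.Int.mod (sub - 1) 12 < 12 := PySem.Int.mod_lt _ (by norm_num)
  set q := PySem.Int.floordiv (sub - 1) 12 with hq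
  set m := PySem.Int.mod (sub - 1) 12 with hm
  have hq11 : q = 11 := by omega
  have hA : (calculate_100_000 zone mp sub).head? = some ("lt", pvFmt zone mp 1 (-1) (sub - 13)) := by
    simp only [calculate_100_000]
    by_cases h : sub = 144
    · simp [h, PySem.Dict.ofList, PySem.Dict.update, PySem.Dict.insert, PySem.Dict.contains,
        PySem.Dict.items, PySem.Dict.empty]
    · simp [show ¬ (1 ≤ sub ∧ sub ≤ 12) from by omega,
        show (133 ≤ sub ∧ sub ≤ 144) from by omega, show ¬ sub = 133 from by omega, h,
        PySem.Dict.ofList, PySem.Dict.update, PySem.Dict.insert, PySem.Dict.contains,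
        PySem.Dict.items, PySem.Dict.empty]
  have hB : (calculate_100_000_alt zone mp sub).head? = some ("lt", pvFmt zone mp 0 0 (120 + m)) := by
    simp only [calculate_100_000_alt, List.foldl]
    rw [← hq, ← hm]
    simp [hq11, show ¬ m = 0 from by omega, show ¬ q = 0 from by omega]
    apply pvFmt_congr <;> omega
  rw [heq, hB] at hA
  have hfmt : pvFmt zone mp 0 0 (120 + m) = pvFmt zone mp 1 (-1) (sub - 13) := by
    have h' := hA
    simp only [Option.some.injEq, Prod.mk.injEq] at h'
    exact h'.2
  have hchars := congrArg String.toList hfmt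
  simp only [pvFmt, String.toList_ofList, List.cons.injEq] at hchars
  have hhead : pvChr (pvOrd zone + 0) = pvChr (pvOrd zone + 1) := hchars.1
  have ho : pvOrd zone = (c.toNat : Int) := by simp [pvOrd, hc]
  have h5 := congrArg Char.toNat hhead
  simp only [pvChr, ho] at h5
  rw [show ((c.toNat : Int) + 0).toNat = c.toNat from by omega,
    show ((c.toNat : Int) + 1).toNat = c.toNat + 1 from by omega,
    pvChrToNat _ (by omega), pvChrToNat _ (by omega)] at h5
  omega
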